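-- pv_equiv track=rewrite | github.com/calesthio/OpenMontage | tools/audio/tts_segment_lab.py | _longest_inactive_run
-- ===== SOURCE A (Python) =====
-- from typing import Any
--
-- def _longest_inactive_run(energy_profile: list[dict[str, Any]]) -> int:
--     longest = 0
--     current = 0
--     for point in energy_profile:
--         if point.get("active"):
--             current = 0
--         else:
--             current += 1
--             longest = max(longest, current)
--     return longest
-- ===== SOURCE B (Python) =====
-- from itertools import groupby
-- from typing import Any
--
-- def _longest_inactive_run(energy_profile: list[dict[str, Any]]) -> int:
--     flags = [bool(point.get("active")) for point in energy_profile]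
--     return max(
--         (len(list(group)) for active, group in groupby(flags) if not active),
--         default=0,
--     )
-- ===== Notes on version B (the rewrite author's own statement) =====
-- stated objective: idiomatic
-- what changed: Replaces the incremental counter/running-max loop with itertools.groupby: the profile is partitioned into maximal runs of equal activity and the answer is the max length over the inactive runs (default 0).
import Mathlib
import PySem

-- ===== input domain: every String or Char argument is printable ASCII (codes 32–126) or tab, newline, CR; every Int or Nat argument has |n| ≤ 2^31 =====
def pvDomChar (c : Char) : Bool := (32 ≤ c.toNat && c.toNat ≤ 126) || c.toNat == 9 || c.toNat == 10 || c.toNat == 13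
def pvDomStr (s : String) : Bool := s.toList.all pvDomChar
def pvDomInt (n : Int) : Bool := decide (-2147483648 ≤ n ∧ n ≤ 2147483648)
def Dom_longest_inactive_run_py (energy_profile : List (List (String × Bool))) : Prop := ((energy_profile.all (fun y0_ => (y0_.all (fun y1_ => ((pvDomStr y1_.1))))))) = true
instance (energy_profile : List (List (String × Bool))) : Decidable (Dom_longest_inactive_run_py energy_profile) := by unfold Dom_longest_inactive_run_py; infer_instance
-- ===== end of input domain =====

-- B replaces A's incremental counter/running-max loop by a group-into-maximal-runs
-- decomposition (itertools.groupby) and takes the max length over the inactive runs.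

-- point.get("active") truthiness: missing key -> falsy, else the stored Bool
def pvActive (point : List (String × Bool)) : Bool :=
  ((PySem.Dict.mk point).get? "active").getD false

-- ===== PORT A =====
-- literal port of the loop: state (longest, current), updated per point
def longest_inactive_run_py (energy_profile : List (List (String × Bool))) : Int :=
  (energy_profile.foldl
    (fun (st : Int × Int) point =>
      if pvActive point then (st.1, 0)
      else (max st.1 (st.2 + 1), st.2 + 1))
    (0, 0)).1

-- ===== PORT B =====
-- groupby flags: lengths of the maximal runs of consecutive `false` flags
def pvInactiveRuns : List Bool → List Int
  | [] => []
  | true :: t => pvInactiveRuns t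
  | false :: t =>
      (((t.takeWhile (· == false)).length : Int) + 1)
        :: pvInactiveRuns (t.dropWhile (· == false))
termination_by bs => bs.length
decreasing_by
  · simp
  · have := List.length_dropWhile_le (p := fun x : Bool => x == false) (l := t)
    simp only [List.length_cons]; omega

def longest_inactive_run_py_alt (energy_profile : List (List (String × Bool))) : Int :=
  (pvInactiveRuns (energy_profile.map pvActive)).foldl max 0

-- ===== PRECONDITION & SPEC =====
def Spec_longest_inactive_run_py (energy_profile : List (List (String × Bool))) (out : Int) : Prop := out = longest_inactive_run_py_alt energy_profile
instance (energy_profile : List (List (String × Bool))) (out : Int) : Decidable (Spec_longest_inactive_run_py energy_profile out) := by unfold Spec_longest_inactive_run_py; infer_instance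

-- ===== CLAIM (what is proved, stated in full; the proofs are below) =====
def Claim_equal_longest_inactive_run_py : Prop := ∀ (energy_profile : List (List (String × Bool))), Dom_longest_inactive_run_py energy_profile → Spec_longest_inactive_run_py energy_profile (longest_inactive_run_py energy_profile)

-- ===== LEMMAS AND PROOFS =====

-- abstract form of A's loop over the flag list
def pvAux : Int → List Bool → Int
  | c, [] => c
  | c, true :: t => max c (pvAux 0 t)
  | c, false :: t => pvAux (c + 1) t

lemma pvAux_ge (bs : List Bool) : ∀ c : Int, c ≤ pvAux c bs := by
  induction bs with
  | nil => intro c; simp [pvAux]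
  | cons b t ih =>
    intro c
    cases b with
    | true => simp [pvAux]
    | false => simpa [pvAux] using le_trans (by omega) (ih (c + 1))

lemma pvFold_fst (bs : List Bool) :
    ∀ l c : Int, 0 ≤ c → c ≤ l →
    (bs.foldl (fun (st : Int × Int) b =>
        if b then (st.1, 0) else (max st.1 (st.2 + 1), st.2 + 1)) (l, c)).1
      = max l (pvAux c bs) := by
  induction bs with
  | nil => intro l c _ hcl; simp [pvAux]; omega
  | cons b t ih =>
    intro l c hc hcl
    cases b with
    | true =>
      have h := ih l 0 le_rfl (le_trans hc hcl)
      have h2 := pvAux_ge t 0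
      simp only [List.foldl, pvAux, if_true] at *
      rw [h]
      omega
    | false =>
      have h := ih (max l (c + 1)) (c + 1) (by omega) (by omega)
      have h2 := pvAux_ge t (c + 1)
      simp only [List.foldl]
      rw [show (if (false = true) then ((l : Int), (0 : Int)) else (max l (c + 1), c + 1))
            = (max l (c + 1), c + 1) from by simp]
      rw [h]
      simp only [pvAux]
      omega

lemma pvAux_false_run (tw : List Bool) :
    ∀ (t : List Bool) (c : Int), (∀ b ∈ tw, b = false) →
    pvAux c (tw ++ t) = pvAux (c + tw.length) t := by
  induction tw with
  | nil => intro t c _; simp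
  | cons b r ih =>
    intro t c h
    have hb : b = false := h b (List.mem_cons_self ..)
    subst hb
    have := ih t (c + 1) (fun x hx => h x (List.mem_cons_of_mem _ hx))
    simp only [List.cons_append, pvAux, this]
    congr 1
    simp only [List.length_cons]
    push_cast
    ring

lemma pvAux_restart (dw : List Bool) (c : Int)
    (h0 : 0 ≤ c) (h : dw = [] ∨ ∃ d, dw = true :: d) :
    pvAux c dw = max c (pvAux 0 dw) := by
  rcases h with h | ⟨d, h⟩ <;> subst h
  · simp [pvAux]; omega
  · have := pvAux_ge d 0
    simp [pvAux]
    omega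

lemma pvDropShape (t : List Bool) :
    t.dropWhile (· == false) = [] ∨ ∃ d, t.dropWhile (· == false) = true :: d := by
  induction t with
  | nil => exact Or.inl rfl
  | cons b r ih =>
    cases b
    · simpa [List.dropWhile_cons] using ih
    · exact Or.inr ⟨r, by simp⟩

lemma pvFoldMax (l : List Int) : ∀ a b : Int, l.foldl max (max a b) = max a (l.foldl max b) := by
  induction l with
  | nil => intro a b; simp
  | cons x t ih =>
    intro a b
    simp only [List.foldl, max_assoc]
    exact ih a (max b x)

lemma pvAux_eq_runs (bs : List Bool) : pvAux 0 bs = (pvInactiveRuns bs).foldl max 0 := by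
  fun_induction pvInactiveRuns bs with
  | case1 => simp [pvAux]
  | case2 t ih =>
    have h2 := pvAux_ge t 0
    simp only [pvAux]
    omega
  | case3 t ih =>
    have hsplit : t = t.takeWhile (· == false) ++ t.dropWhile (· == false) :=
      (List.takeWhile_append_dropWhile).symm
    have htw : ∀ b ∈ t.takeWhile (· == false), b = false := by
      intro b hb
      simpa using List.mem_takeWhile_imp hb
    have h1 : pvAux 0 (false :: t)
        = max (((t.takeWhile (· == false)).length : Int) + 1)
            (pvAux 0 (t.dropWhile (· == false))) := by
      calc pvAux 0 (false :: t)
          = pvAux 1 t := by simp [pvAux]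
        _ = pvAux 1 (t.takeWhile (· == false) ++ t.dropWhile (· == false)) := by rw [← hsplit]
        _ = pvAux (1 + ((t.takeWhile (· == false)).length : Int)) (t.dropWhile (· == false)) :=
              pvAux_false_run _ _ _ htw
        _ = max (1 + ((t.takeWhile (· == false)).length : Int))
              (pvAux 0 (t.dropWhile (· == false))) :=
              pvAux_restart _ _ (by positivity) (pvDropShape t)
        _ = max (((t.takeWhile (· == false)).length : Int) + 1)
              (pvAux 0 (t.dropWhile (· == false))) := by rw [add_comm]
    rw [h1, ih]
    simp only [List.foldl]
    rw [max_comm (0 : Int), pvFoldMax]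

-- ===== VERDICT (by name: the statement is the Claim_ definition above) =====
theorem longest_inactive_run_py_spec : Claim_equal_longest_inactive_run_py := by
  intro ep _
  show longest_inactive_run_py ep = longest_inactive_run_py_alt ep
  unfold longest_inactive_run_py longest_inactive_run_py_alt
  have heq : ((ep.map pvActive).foldl
        (fun (st : Int × Int) b => if b then (st.1, 0) else (max st.1 (st.2 + 1), st.2 + 1))
        ((0 : Int), (0 : Int)))
      = ep.foldl
        (fun (st : Int × Int) point =>
          if pvActive point then (st.1, 0) else (max st.1 (st.2 + 1), st.2 + 1))
        ((0 : Int), (0 : Int)) := by rw [List.foldl_map]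
  rw [← heq]
  rw [pvFold_fst (ep.map pvActive) 0 0 le_rfl le_rfl, ← pvAux_eq_runs]
  have := pvAux_ge (ep.map pvActive) 0
  omega
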